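-- pv_equiv track=rewrite | github.com/ThatSnail/vindinium_bots | crapbot/pos.py | in_radius
-- ===== SOURCE A (Python) =====
-- def in_radius(pos, radius, size):
--     if radius == 0:
--         return [pos]
--     x, y = pos[0], pos[1]
--     out = []
--     def check_append(x, y):
--         if valid_pos(x, y, size):
--             out.append((x, y))
--     for r in range(radius):
--         check_append(x + r, y + radius - r - 1)
--         check_append(x + radius - r - 1, y + r)
--         check_append(x - r, y - (radius - r - 1))
--         check_append(x - (radius - r - 1), y - r)
--     return out + in_radius(pos, radius - 1, size)
--
-- def valid_pos(x, y, size):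
--     return 0 <= x and x < size and 0 <= y and y < size
-- ===== SOURCE B (Python) =====
-- def in_radius(pos, radius, size):
--     x, y = pos[0], pos[1]
--     out = []
--     for d in range(radius, 0, -1):
--         for r in range(d):
--             for (px, py) in ((x + r, y + d - r - 1),
--                              (x + d - r - 1, y + r),
--                              (x - r, y - (d - r - 1)),
--                              (x - (d - r - 1), y - r)):
--                 if valid_pos(px, py, size):
--                     out.append((px, py))
--     out.append(pos)
--     return out
--
-- def valid_pos(x, y, size):
--     return 0 <= x and x < size and 0 <= y and y < size
-- ===== Notes on version B (the rewrite author's own statement) =====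
-- stated objective: simpler
-- what changed: Replaces A's tail recursion over radius with a single explicit double loop (d from radius down to 1, then r), iterating the four candidate points from a tuple, and appends the centre once at the end; same output order.
import Mathlib
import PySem

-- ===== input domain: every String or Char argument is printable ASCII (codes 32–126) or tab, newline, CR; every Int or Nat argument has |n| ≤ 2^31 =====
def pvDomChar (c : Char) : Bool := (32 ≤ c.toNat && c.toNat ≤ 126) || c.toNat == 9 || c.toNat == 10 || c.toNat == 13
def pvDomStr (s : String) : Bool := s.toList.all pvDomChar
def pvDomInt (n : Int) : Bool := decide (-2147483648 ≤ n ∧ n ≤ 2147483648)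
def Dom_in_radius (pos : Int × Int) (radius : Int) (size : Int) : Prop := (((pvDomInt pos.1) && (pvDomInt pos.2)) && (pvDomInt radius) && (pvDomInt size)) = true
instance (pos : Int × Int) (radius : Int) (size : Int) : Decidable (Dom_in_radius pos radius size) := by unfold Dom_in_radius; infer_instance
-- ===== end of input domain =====

-- B flattens A's tail recursion over radius into one explicit double loop (same output order); on radius < 0, where A raises RecursionError, B returns [pos].


-- ===== PORT A =====
def valid_pos (x y size : Int) : Bool :=
  decide (0 ≤ x) && decide (x < size) && decide (0 ≤ y) && decide (y < size)

-- A tests 'radius == 0'; the guard is '≤ 0' only to make the recursion total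
-- (A never returns for radius < 0; such inputs are outside Pre_in_radius).
def in_radius (pos : Int × Int) (radius : Int) (size : Int) : List (Int × Int) :=
  if radius ≤ 0 then [pos]
  else
    let x := pos.1
    let y := pos.2
    let out := (PySem.List.pyRange 0 radius 1).foldl (fun out r =>
      let out := if valid_pos (x + r) (y + radius - r - 1) size then out ++ [(x + r, y + radius - r - 1)] else out
      let out := if valid_pos (x + radius - r - 1) (y + r) size then out ++ [(x + radius - r - 1, y + r)] else out
      let out := if valid_pos (x - r) (y - (radius - r - 1)) size then out ++ [(x - r, y - (radius - r - 1))] else out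
      if valid_pos (x - (radius - r - 1)) (y - r) size then out ++ [(x - (radius - r - 1), y - r)] else out) []
    out ++ in_radius pos (radius - 1) size
termination_by radius.toNat
decreasing_by omega

-- ===== PORT B =====
def in_radius_alt (pos : Int × Int) (radius : Int) (size : Int) : List (Int × Int) :=
  let x := pos.1
  let y := pos.2
  let out := (PySem.List.pyRange radius 0 (-1)).foldl (fun out d =>
    (PySem.List.pyRange 0 d 1).foldl (fun out r =>
      [(x + r, y + d - r - 1), (x + d - r - 1, y + r),
       (x - r, y - (d - r - 1)), (x - (d - r - 1), y - r)].foldl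
        (fun out p => if valid_pos p.1 p.2 size then out ++ [p] else out) out) out) []
  out ++ [pos]

-- ===== PRECONDITION & SPEC =====
-- Pre_ excludes radius < 0, on which Python A recurses forever (RecursionError).
def Pre_in_radius (pos : Int × Int) (radius : Int) (size : Int) : Prop := 0 ≤ radius
instance (pos : Int × Int) (radius : Int) (size : Int) : Decidable (Pre_in_radius pos radius size) := by unfold Pre_in_radius; infer_instance
def pvWitness_in_radius : (Int × Int) × Int × Int := ((1, 1), 2, 5)

def Spec_in_radius (pos : Int × Int) (radius : Int) (size : Int) (out : List (Int × Int)) : Prop := out = in_radius_alt pos radius size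
instance (pos : Int × Int) (radius : Int) (size : Int) (out : List (Int × Int)) : Decidable (Spec_in_radius pos radius size out) := by unfold Spec_in_radius; infer_instance

-- ===== CLAIM (what is proved, stated in full; the proofs are below) =====
def Claim_equal_in_radius : Prop := ∀ (pos : Int × Int) (radius : Int) (size : Int), Dom_in_radius pos radius size → Pre_in_radius pos radius size → Spec_in_radius pos radius size (in_radius pos radius size)

-- ===== LEMMAS AND PROOFS =====

-- the four candidate points of ring d at offset r, kept in A/B's order and filtered by valid_pos
def pvRing (pos : Int × Int) (d size : Int) : List (Int × Int) :=
  (PySem.List.pyRange 0 d 1).flatMap (fun r =>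
    [(pos.1 + r, pos.2 + d - r - 1), (pos.1 + d - r - 1, pos.2 + r),
     (pos.1 - r, pos.2 - (d - r - 1)), (pos.1 - (d - r - 1), pos.2 - r)].filter
      (fun p => valid_pos p.1 p.2 size))

lemma stepA_eq (x y size d : Int) (out : List (Int × Int)) (r : Int) :
    (let o1 := if valid_pos (x + r) (y + d - r - 1) size then out ++ [(x + r, y + d - r - 1)] else out
     let o2 := if valid_pos (x + d - r - 1) (y + r) size then o1 ++ [(x + d - r - 1, y + r)] else o1
     let o3 := if valid_pos (x - r) (y - (d - r - 1)) size then o2 ++ [(x - r, y - (d - r - 1))] else o2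
     if valid_pos (x - (d - r - 1)) (y - r) size then o3 ++ [(x - (d - r - 1), y - r)] else o3)
    = out ++ ([(x + r, y + d - r - 1), (x + d - r - 1, y + r),
               (x - r, y - (d - r - 1)), (x - (d - r - 1), y - r)].filter
                (fun p : Int × Int => valid_pos p.1 p.2 size)) := by
  simp only [List.filter]
  cases valid_pos (x + r) (y + d - r - 1) size <;>
    cases valid_pos (x + d - r - 1) (y + r) size <;>
      cases valid_pos (x - r) (y - (d - r - 1)) size <;>
        cases valid_pos (x - (d - r - 1)) (y - r) size <;> simp

lemma in_radius_eq (pos : Int × Int) (radius size : Int) (h : 0 ≤ radius) :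
    in_radius pos radius size
      = (PySem.List.pyRange radius 0 (-1)).flatMap (fun d => pvRing pos d size) ++ [pos] := by
  induction radius, h using Int.le_induction with
  | base =>
      rw [in_radius]
      simp [PySem.List.pyRange_neg_one_eq_nil (le_refl (0 : Int))]
  | succ n hn ih =>
      rw [in_radius]
      have hngt : ¬ (n + 1 ≤ (0 : Int)) := by omega
      rw [if_neg hngt]
      have hstep : (PySem.List.pyRange 0 (n + 1) 1).foldl (fun out r =>
          let o1 := if valid_pos (pos.1 + r) (pos.2 + (n + 1) - r - 1) size then out ++ [(pos.1 + r, pos.2 + (n + 1) - r - 1)] else out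
          let o2 := if valid_pos (pos.1 + (n + 1) - r - 1) (pos.2 + r) size then o1 ++ [(pos.1 + (n + 1) - r - 1, pos.2 + r)] else o1
          let o3 := if valid_pos (pos.1 - r) (pos.2 - ((n + 1) - r - 1)) size then o2 ++ [(pos.1 - r, pos.2 - ((n + 1) - r - 1))] else o2
          if valid_pos (pos.1 - ((n + 1) - r - 1)) (pos.2 - r) size then o3 ++ [(pos.1 - ((n + 1) - r - 1), pos.2 - r)] else o3)
          ([] : List (Int × Int))
          = [] ++ pvRing pos (n + 1) size := by
        unfold pvRing
        rw [← PySem.List.foldl_append_eq_flatMap]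
        exact PySem.List.foldl_congr_mem _ _ _ _ (fun acc r _ => stepA_eq pos.1 pos.2 size (n + 1) acc r)
      simp only [hstep, List.nil_append]
      rw [PySem.List.pyRange_neg_one_cons (by omega : (0 : Int) < n + 1)]
      simp [ih]

lemma in_radius_alt_eq (pos : Int × Int) (radius size : Int) :
    in_radius_alt pos radius size
      = (PySem.List.pyRange radius 0 (-1)).flatMap (fun d => pvRing pos d size) ++ [pos] := by
  simp only [in_radius_alt]
  have houter : ∀ (acc : List (Int × Int)) (d : Int), d ∈ PySem.List.pyRange radius 0 (-1) →
      (PySem.List.pyRange 0 d 1).foldl (fun out r =>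
        [(pos.1 + r, pos.2 + d - r - 1), (pos.1 + d - r - 1, pos.2 + r),
         (pos.1 - r, pos.2 - (d - r - 1)), (pos.1 - (d - r - 1), pos.2 - r)].foldl
          (fun out p => if valid_pos p.1 p.2 size then out ++ [p] else out) out) acc
      = acc ++ pvRing pos d size := by
    intro acc d _
    unfold pvRing
    rw [← PySem.List.foldl_append_eq_flatMap]
    exact PySem.List.foldl_congr_mem _ _ _ _ (fun a r _ => PySem.List.foldl_append_if_eq_filter _ _ _)
  rw [PySem.List.foldl_congr_mem (PySem.List.pyRange radius 0 (-1)) _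
        (fun acc d => acc ++ pvRing pos d size) []
        (fun acc d hd => houter acc d hd)]
  rw [PySem.List.foldl_append_eq_flatMap]
  simp

-- ===== VERDICT (by name: the statement is the Claim_ definition above) =====
theorem in_radius_spec : Claim_equal_in_radius := by
  intro pos radius size _ hpre
  unfold Spec_in_radius
  rw [in_radius_eq pos radius size hpre, in_radius_alt_eq]
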